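-- pv_equiv track=rewrite | github.com/acarrasco/programa_conmigo | ep050/hr_cards_permutation_lineal_algebra_1.py | ways_to_draw_from_two_sets
-- ===== SOURCE A (Python) =====
-- from math import factorial, comb
--
-- def ways_to_draw_from_two_sets(n_draws, set_a_size, set_b_size):
--     """
--     >>> list(ways_to_draw_from_two_sets(2, 1, 3))
--     [(6, 0, 2), (6, 1, 1)]
--
--     >>> list(ways_to_draw_from_two_sets(2, 2, 2))
--     [(2, 0, 2), (8, 1, 1), (2, 2, 0)]
--     """
--     min_from_a = max(0, n_draws - set_b_size)
--     max_from_a = min(n_draws, set_a_size)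
--     for draw_from_a in range(min_from_a, max_from_a+1):
--         draw_from_b = n_draws - draw_from_a
--         ways_to_draw_from_a = comb(set_a_size, draw_from_a)
--         ways_to_draw_from_b = comb(set_b_size, draw_from_b)
--         ways_to_reorder = factorial(n_draws)
--         ways = ways_to_draw_from_a * ways_to_draw_from_b * ways_to_reorder
--         yield ways, draw_from_a, draw_from_b
-- ===== SOURCE B (Python) =====
-- from math import factorial, comb
--
-- def ways_to_draw_from_two_sets(n_draws, set_a_size, set_b_size):
--     lo = max(0, n_draws - set_b_size)
--     hi = min(n_draws, set_a_size)
--     if lo > hi: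
--         return []
--     fact = factorial(n_draws)
--     ca = comb(set_a_size, lo)
--     cb = comb(set_b_size, n_draws - lo)
--     out = []
--     for i in range(lo, hi + 1):
--         out.append((ca * cb * fact, i, n_draws - i))
--         ca = ca * (set_a_size - i) // (i + 1)
--         cb = cb * (n_draws - i) // (set_b_size - (n_draws - i) + 1)
--     return out
-- ===== Notes on version B (the rewrite author's own statement) =====
-- stated objective: faster
-- what changed: B hoists factorial(n_draws) out of the loop and maintains both binomial coefficients incrementally (comb(n,k+1)=comb(n,k)*(n-k)//(k+1)) instead of recomputing comb and factorial from scratch each iteration.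
import Mathlib
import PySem

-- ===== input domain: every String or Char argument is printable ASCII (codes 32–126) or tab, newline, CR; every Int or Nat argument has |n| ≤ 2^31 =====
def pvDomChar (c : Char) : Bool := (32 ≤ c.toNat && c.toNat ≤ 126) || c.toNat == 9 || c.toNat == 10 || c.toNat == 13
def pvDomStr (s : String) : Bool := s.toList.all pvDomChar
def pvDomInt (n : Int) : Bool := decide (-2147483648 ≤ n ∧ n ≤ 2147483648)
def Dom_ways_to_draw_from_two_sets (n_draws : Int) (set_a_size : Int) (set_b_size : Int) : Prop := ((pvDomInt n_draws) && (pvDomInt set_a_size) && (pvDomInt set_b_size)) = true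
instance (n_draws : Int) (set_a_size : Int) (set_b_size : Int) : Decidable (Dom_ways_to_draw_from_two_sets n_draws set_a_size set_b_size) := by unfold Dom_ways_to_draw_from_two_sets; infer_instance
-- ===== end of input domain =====

-- B hoists factorial out of the loop and updates the two binomial coefficients incrementally
-- (one multiply/divide per step) instead of recomputing comb and factorial each iteration; faster.
-- A is a Python generator; the ports model the list of yielded tuples (as 3-element lists).

-- math.comb(n, k) for the arguments A/B actually evaluate (always 0 ≤ k, 0 ≤ n there):
def pyComb (n k : Int) : Int := (n.toNat.choose k.toNat : Int)
-- math.factorial(n) for the arguments actually evaluated (always 0 ≤ n there):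
def pyFact (n : Int) : Int := (n.toNat.factorial : Int)

-- ===== PORT A =====
def ways_to_draw_from_two_sets (n_draws : Int) (set_a_size : Int) (set_b_size : Int) : List (List Int) :=
  let min_from_a := max 0 (n_draws - set_b_size)
  let max_from_a := min n_draws set_a_size
  (PySem.List.pyRange min_from_a (max_from_a + 1) 1).map (fun draw_from_a =>
    let draw_from_b := n_draws - draw_from_a
    let ways_to_draw_from_a := pyComb set_a_size draw_from_a
    let ways_to_draw_from_b := pyComb set_b_size draw_from_b
    let ways_to_reorder := pyFact n_draws
    let ways := ways_to_draw_from_a * ways_to_draw_from_b * ways_to_reorder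
    [ways, draw_from_a, draw_from_b])

-- ===== PORT B =====
-- the 'for i in range(lo, hi+1)' loop of Source B, fuel = number of remaining iterations
def altLoop (n_draws set_a_size set_b_size fact : Int) :
    Nat → Int → Int → Int → List (List Int)
  | 0, _, _, _ => []
  | f + 1, i, ca, cb =>
    [ca * cb * fact, i, n_draws - i] ::
      altLoop n_draws set_a_size set_b_size fact f (i + 1)
        (PySem.Int.floordiv (ca * (set_a_size - i)) (i + 1))
        (PySem.Int.floordiv (cb * (n_draws - i)) (set_b_size - (n_draws - i) + 1))

def ways_to_draw_from_two_sets_alt (n_draws : Int) (set_a_size : Int) (set_b_size : Int) : List (List Int) :=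
  let lo := max 0 (n_draws - set_b_size)
  let hi := min n_draws set_a_size
  if lo > hi then []
  else
    altLoop n_draws set_a_size set_b_size (pyFact n_draws)
      (hi + 1 - lo).toNat lo (pyComb set_a_size lo) (pyComb set_b_size (n_draws - lo))

-- ===== PRECONDITION & SPEC =====
def Spec_ways_to_draw_from_two_sets (n_draws : Int) (set_a_size : Int) (set_b_size : Int) (out : List (List Int)) : Prop := out = ways_to_draw_from_two_sets_alt n_draws set_a_size set_b_size
instance (n_draws : Int) (set_a_size : Int) (set_b_size : Int) (out : List (List Int)) : Decidable (Spec_ways_to_draw_from_two_sets n_draws set_a_size set_b_size out) := by unfold Spec_ways_to_draw_from_two_sets; infer_instance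

-- ===== CLAIM (what is proved, stated in full; the proofs are below) =====
def Claim_equal_ways_to_draw_from_two_sets : Prop := ∀ (n_draws : Int) (set_a_size : Int) (set_b_size : Int), Dom_ways_to_draw_from_two_sets n_draws set_a_size set_b_size → Spec_ways_to_draw_from_two_sets n_draws set_a_size set_b_size (ways_to_draw_from_two_sets n_draws set_a_size set_b_size)

-- ===== LEMMAS AND PROOFS =====

-- Pascal step, Nat form: holds for ALL a i (both sides are 0 when i ≥ a).
lemma choose_step_nat (a i : Nat) : (a.choose i * (a - i)) / (i + 1) = a.choose (i + 1) := by
  rw [← Nat.choose_succ_right_eq]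
  exact Nat.mul_div_cancel _ (Nat.succ_pos i)

-- upward update of ca (valid for all 0 ≤ i, 0 ≤ a)
lemma comb_up (a i : Int) (ha : 0 ≤ a) (hi : 0 ≤ i) :
    PySem.Int.floordiv (pyComb a i * (a - i)) (i + 1) = pyComb a (i + 1) := by
  by_cases h : i ≤ a
  · have hprod : pyComb a i * (a - i) = ((a.toNat.choose i.toNat * (a.toNat - i.toNat) : Nat) : Int) := by
      have hs : a - i = ((a.toNat - i.toNat : Nat) : Int) := by omega
      rw [pyComb, hs, ← Nat.cast_mul]
    have h1 : (i + 1) = ((i.toNat + 1 : Nat) : Int) := by omega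
    rw [hprod, h1, PySem.Int.floordiv_natCast, choose_step_nat, pyComb]
    congr 1
  · have h0 : pyComb a i = 0 := by
      simp [pyComb, Nat.choose_eq_zero_of_lt (by omega : a.toNat < i.toNat)]
    have h1 : pyComb a (i + 1) = 0 := by
      simp [pyComb, Nat.choose_eq_zero_of_lt (by omega : a.toNat < (i+1).toNat)]
    rw [h0, h1, zero_mul, PySem.Int.floordiv_eq_ediv_of_pos (by omega)]
    simp

-- downward update of cb: comb(b, j-1) = comb(b, j) * j // (b - j + 1), for 1 ≤ j ≤ b
lemma comb_down (b j : Int) (h1 : 1 ≤ j) (h2 : j ≤ b) :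
    PySem.Int.floordiv (pyComb b j * j) (b - j + 1) = pyComb b (j - 1) := by
  have key : b.toNat.choose (j.toNat - 1 + 1) * (j.toNat - 1 + 1) =
      b.toNat.choose (j.toNat - 1) * (b.toNat - (j.toNat - 1)) := Nat.choose_succ_right_eq _ _
  have hj : j.toNat - 1 + 1 = j.toNat := by omega
  rw [hj] at key
  have hprod : pyComb b j * j = ((b.toNat.choose (j.toNat - 1) * (b.toNat - (j.toNat - 1)) : Nat) : Int) := by
    rw [← key, pyComb, Nat.cast_mul]
    congr 1
    omega
  have hdiv : (b - j + 1) = ((b.toNat - (j.toNat - 1) : Nat) : Int) := by omega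
  have hpos : 0 < b.toNat - (j.toNat - 1) := by omega
  rw [hprod, hdiv, PySem.Int.floordiv_natCast, Nat.mul_div_cancel _ hpos]
  simp only [pyComb]
  congr 2
  omega

-- the loop computes the map of the closed form over the remaining range
lemma altLoop_eq (n a b fact : Int) (hi : Int) (hhn : hi ≤ n) (hha : hi ≤ a) :
    ∀ (f : Nat) (i ca cb : Int), 0 ≤ i → n - b ≤ i → i + f = hi + 1 →
    (0 < f → ca = pyComb a i ∧ cb = pyComb b (n - i)) →
    altLoop n a b fact f i ca cb =
      (PySem.List.pyRange i (hi + 1) 1).map (fun k =>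
        [pyComb a k * pyComb b (n - k) * fact, k, n - k]) := by
  intro f
  induction f with
  | zero =>
    intro i ca cb _ _ hif _
    rw [altLoop, PySem.List.pyRange_one]
    have : (hi + 1 - i).toNat = 0 := by omega
    simp [this]
  | succ f ih =>
    intro i ca cb h0 hnb hif hinv
    obtain ⟨hca, hcb⟩ := hinv (Nat.succ_pos f)
    have hile : i ≤ hi := by omega
    rw [altLoop, PySem.List.pyRange_one_cons (by omega : i < hi + 1)]
    have hup : PySem.Int.floordiv (ca * (a - i)) (i + 1) = pyComb a (i + 1) := by
      rw [hca]; exact comb_up a i (by omega) h0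
    congr 1
    · rw [hca, hcb]
    · rw [ih (i + 1) _ _ (by omega) (by omega) (by omega)]
      intro hf
      refine ⟨hup, ?_⟩
      have hi1 : i + 1 ≤ hi := by omega
      rw [hcb]
      have : n - (i + 1) = (n - i) - 1 := by ring
      rw [this]
      exact comb_down b (n - i) (by omega) (by omega)

-- ===== VERDICT (by name: the statement is the Claim_ definition above) =====
theorem ways_to_draw_from_two_sets_spec : Claim_equal_ways_to_draw_from_two_sets := by
  intro n a b _
  unfold Spec_ways_to_draw_from_two_sets ways_to_draw_from_two_sets ways_to_draw_from_two_sets_alt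
  set lo := max 0 (n - b) with hlo
  set hi := min n a with hhi
  by_cases h : lo > hi
  · simp only [if_pos h]
    rw [PySem.List.pyRange_one]
    have : (hi + 1 - lo).toNat = 0 := by omega
    simp [this]
  · simp only [if_neg h]
    rw [altLoop_eq n a b (pyFact n) hi (by omega) (by omega)
      (hi + 1 - lo).toNat lo _ _ (by omega) (by omega) (by omega)
      (fun _ => ⟨rfl, rfl⟩)]
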